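-- pv_equiv track=rewrite | github.com/Hacker-KM/Leetcode_Hacker_KM | 2038-remove-colored-pieces-if-both-neighbors-are-the-same-color/2038-remove-colored-pieces-if-both-neighbors-are-the-same-color.py | winnerOfGame
-- ===== SOURCE A (Python) =====
-- def winnerOfGame(colors: str) -> bool:
--
--     # TLE
--
--     # A_turn = True
--     # while "AAA" in colors and "BBB" in colors:
--     #     if A_turn:
--     #         colors = colors.replace("AAA", "AA", 1)
--     #     else:
--     #         colors = colors.replace("BBB", "BB", 1)
--     #     A_turn = not A_turn
--     # return "AAA" in colors
--
--     A_score = B_score = 0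
--     for i in range(1,len(colors)-1):
--         prev = colors[i-1]
--         nextt = colors[i+1]
--         if prev == nextt == colors[i] == "A":
--             A_score+=1
--         elif prev == nextt == colors[i] == "B":
--             B_score+=1
--     return A_score>B_score
-- ===== SOURCE B (Python) =====
-- def winnerOfGame(colors: str) -> bool:
--     # Decompose into maximal runs; a run of length L >= 3 of 'A'/'B'
--     # yields L-2 removable pieces for that player.
--     a_score = b_score = 0
--     run_char = None
--     run_len = 0
--     for ch in colors:
--         if ch == run_char:
--             run_len += 1
--         else:
--             if run_char == 'A':
--                 a_score += max(run_len - 2, 0)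
--             elif run_char == 'B':
--                 b_score += max(run_len - 2, 0)
--             run_char = ch
--             run_len = 1
--     if run_char == 'A':
--         a_score += max(run_len - 2, 0)
--     elif run_char == 'B':
--         b_score += max(run_len - 2, 0)
--     return a_score > b_score
-- ===== Notes on version B (the rewrite author's own statement) =====
-- stated objective: alternative
-- what changed: B replaces A's per-position check that a piece equals both neighbours with a single run-length pass: it groups colors into maximal runs and adds max(L-2,0) per run of either player's color.
import Mathlib
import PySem

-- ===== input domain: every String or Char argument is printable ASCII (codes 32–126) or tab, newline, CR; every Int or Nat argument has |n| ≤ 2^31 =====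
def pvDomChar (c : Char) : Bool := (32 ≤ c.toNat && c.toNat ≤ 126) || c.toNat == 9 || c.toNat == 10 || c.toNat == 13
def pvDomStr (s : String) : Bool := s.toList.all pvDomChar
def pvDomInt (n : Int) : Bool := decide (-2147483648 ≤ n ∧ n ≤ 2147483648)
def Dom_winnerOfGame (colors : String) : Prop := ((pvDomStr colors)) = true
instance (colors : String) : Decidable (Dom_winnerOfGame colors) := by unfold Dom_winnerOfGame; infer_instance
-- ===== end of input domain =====

-- B counts removable pieces per maximal run (max(L-2,0) each) instead of A's per-position
-- triple check; a different decomposition of the same O(n) job. Both ports are total.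

-- ===== PORT A =====
-- loop body of A; for i ∈ range(1, len-1) the indices i-1, i, i+1 are always in range,
-- so the pyGetD default ' ' is never used
def stepA (l : List Char) (sc : Int × Int) (i : Int) : Int × Int :=
  let prev := PySem.List.pyGetD l (i - 1) ' '
  let nextt := PySem.List.pyGetD l (i + 1) ' '
  if prev = nextt ∧ nextt = PySem.List.pyGetD l i ' ' ∧ PySem.List.pyGetD l i ' ' = 'A' then
    (sc.1 + 1, sc.2)
  else if prev = nextt ∧ nextt = PySem.List.pyGetD l i ' ' ∧ PySem.List.pyGetD l i ' ' = 'B' then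
    (sc.1, sc.2 + 1)
  else sc

def winnerOfGame (colors : String) : Bool :=
  let l := colors.toList
  let sc := (PySem.List.pyRange 1 (PySem.Str.len colors - 1) 1).foldl (stepA l) (0, 0)
  decide (sc.1 > sc.2)

-- ===== PORT B =====
-- close a finished run: a run of length rl of 'A'/'B' contributes max (rl-2) 0
def flushB (a b : Int) (rc : Option Char) (rl : Int) : Int × Int :=
  if rc = some 'A' then (a + max (rl - 2) 0, b)
  else if rc = some 'B' then (a, b + max (rl - 2) 0)
  else (a, b)

-- loop body of B: extend the current run, or flush it and start a new one
def stepB (st : Int × Int × Option Char × Int) (ch : Char) : Int × Int × Option Char × Int :=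
  if some ch = st.2.2.1 then (st.1, st.2.1, st.2.2.1, st.2.2.2 + 1)
  else
    let ab := flushB st.1 st.2.1 st.2.2.1 st.2.2.2
    (ab.1, ab.2, some ch, 1)

def winnerOfGame_alt (colors : String) : Bool :=
  let st := colors.toList.foldl stepB (0, 0, none, 0)
  let ab := flushB st.1 st.2.1 st.2.2.1 st.2.2.2
  decide (ab.1 > ab.2)

-- ===== PRECONDITION & SPEC =====
def Spec_winnerOfGame (colors : String) (out : Bool) : Prop := out = winnerOfGame_alt colors
instance (colors : String) (out : Bool) : Decidable (Spec_winnerOfGame colors out) := by unfold Spec_winnerOfGame; infer_instance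

-- ===== CLAIM (what is proved, stated in full; the proofs are below) =====
def Claim_equal_winnerOfGame : Prop := ∀ (colors : String), Dom_winnerOfGame colors → Spec_winnerOfGame colors (winnerOfGame colors)

-- ===== LEMMAS AND PROOFS =====

-- number of indices i with l[i-1] = l[i] = l[i+1] = c, written structurally
def cnt (c : Char) : List Char → Int
  | x :: y :: z :: rest => (if x = z ∧ z = y ∧ y = c then 1 else 0) + cnt c (y :: z :: rest)
  | _ => 0

-- the per-index contribution A tests
def fTrip (l : List Char) (c : Char) (i : Int) : Int :=
  if PySem.List.pyGetD l (i - 1) ' ' = PySem.List.pyGetD l (i + 1) ' ' ∧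
     PySem.List.pyGetD l (i + 1) ' ' = PySem.List.pyGetD l i ' ' ∧
     PySem.List.pyGetD l i ' ' = c then 1 else 0

lemma stepA_eq (l : List Char) (sc : Int × Int) (i : Int) :
    stepA l sc i = (sc.1 + fTrip l 'A' i, sc.2 + fTrip l 'B' i) := by
  unfold stepA fTrip
  by_cases h1 : PySem.List.pyGetD l (i - 1) ' ' = PySem.List.pyGetD l (i + 1) ' ' <;>
  by_cases h2 : PySem.List.pyGetD l (i + 1) ' ' = PySem.List.pyGetD l i ' ' <;>
  by_cases h3 : PySem.List.pyGetD l i ' ' = 'A' <;>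
  by_cases h4 : PySem.List.pyGetD l i ' ' = 'B' <;>
  simp_all

lemma foldA_eq (r : List Int) (l : List Char) (a b : Int) :
    r.foldl (stepA l) (a, b) = (a + (r.map (fTrip l 'A')).sum, b + (r.map (fTrip l 'B')).sum) := by
  induction r generalizing a b with
  | nil => simp
  | cons i r ih =>
    simp only [List.foldl_cons, List.map_cons, List.sum_cons, stepA_eq]
    rw [ih]
    exact Prod.ext (by dsimp; ring) (by dsimp; ring)

lemma fTrip_natCast (l : List Char) (c : Char) (k : Nat) :
    fTrip l c ((k : Int) + 1)
      = if l.getD k ' ' = l.getD (k + 2) ' ' ∧ l.getD (k + 2) ' ' = l.getD (k + 1) ' ' ∧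
           l.getD (k + 1) ' ' = c then 1 else 0 := by
  unfold fTrip
  have e1 : (k : Int) + 1 - 1 = ((k : Nat) : Int) := by ring
  have e2 : (k : Int) + 1 + 1 = ((k + 2 : Nat) : Int) := by push_cast; ring
  have e3 : (k : Int) + 1 = ((k + 1 : Nat) : Int) := by push_cast; ring
  rw [e1, e2, e3]
  simp only [PySem.List.pyGetD_natCast]

lemma sumA_eq (c : Char) (l : List Char) :
    ((PySem.List.pyRange 1 ((l.length : Int) - 1) 1).map (fTrip l c)).sum = cnt c l := by
  induction l using cnt.induct with
  | case2 t h =>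
    rcases t with _ | ⟨a, _ | ⟨b, _ | ⟨d, r⟩⟩⟩
    · rw [PySem.List.pyRange_one_eq_nil (by norm_num)]; simp [cnt]
    · rw [PySem.List.pyRange_one_eq_nil (by norm_num)]; simp [cnt]
    · rw [PySem.List.pyRange_one_eq_nil (by norm_num)]; simp [cnt]
    · exact absurd rfl (h a b d r)
  | case1 x y z rest ih =>
    have hn : (1 : Int) < ((x :: y :: z :: rest).length : Int) - 1 := by
      simp
    rw [PySem.List.pyRange_one_cons hn]
    simp only [List.map_cons, List.sum_cons]
    -- head term
    have hhead : fTrip (x :: y :: z :: rest) c 1 = if x = z ∧ z = y ∧ y = c then 1 else 0 := by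
      have : (1 : Int) = ((0 : Nat) : Int) + 1 := by norm_num
      rw [this, fTrip_natCast]
      simp
    -- tail sum, shifted by one position
    have htail :
        ((PySem.List.pyRange (1 + 1) (((x :: y :: z :: rest).length : Int) - 1) 1).map
            (fTrip (x :: y :: z :: rest) c)).sum
          = ((PySem.List.pyRange 1 (((y :: z :: rest).length : Int) - 1) 1).map
              (fTrip (y :: z :: rest) c)).sum := by
      rw [PySem.List.pyRange_one, PySem.List.pyRange_one]
      have hlen : (((x :: y :: z :: rest).length : Int) - 1 - (1 + 1)).toNat
          = (((y :: z :: rest).length : Int) - 1 - 1).toNat := by simp; omega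
      rw [hlen, List.map_map, List.map_map]
      apply congrArg
      apply List.map_congr_left
      intro k hk
      show fTrip (x :: y :: z :: rest) c (1 + 1 + (k : Int)) = fTrip (y :: z :: rest) c (1 + (k : Int))
      have a1 : (1 : Int) + 1 + (k : Int) = ((k + 1 : Nat) : Int) + 1 := by push_cast; ring
      have a2 : (1 : Int) + (k : Int) = ((k : Nat) : Int) + 1 := by ring
      rw [a1, a2, fTrip_natCast, fTrip_natCast]
      simp
    rw [hhead, htail, ih]
    rfl

lemma cnt_replicate (d c : Char) (k : Nat) :
    cnt d (List.replicate k c) = if d = c then max ((k : Int) - 2) 0 else 0 := by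
  induction k using Nat.strong_induction_on with
  | _ k ih =>
    match k with
    | 0 => simp [cnt]
    | 1 => by_cases h : d = c <;> simp [cnt, h]
    | 2 => by_cases h : d = c <;> simp [cnt, h]
    | (m + 3) =>
      have h2 : List.replicate (m + 3) c = c :: List.replicate (m + 2) c := rfl
      have h3 : List.replicate (m + 2) c = c :: c :: List.replicate m c := rfl
      rw [h2, h3]
      show (if c = c ∧ c = c ∧ c = d then (1:Int) else 0) + cnt d (c :: c :: List.replicate m c) = _
      rw [← h3, ih (m + 2) (by omega)]
      by_cases h : d = c <;> simp [h, eq_comm] <;> omega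

lemma cnt_run_boundary (d c x : Char) (r : List Char) (k : Nat) (hx : x ≠ c) :
    cnt d (List.replicate k c ++ x :: r)
      = (if d = c then max ((k : Int) - 2) 0 else 0) + cnt d (x :: r) := by
  induction k using Nat.strong_induction_on with
  | _ k ih =>
    match k with
    | 0 => by_cases h : d = c <;> simp [h]
    | 1 =>
      rcases r with _ | ⟨z, r'⟩
      · by_cases h : d = c <;> simp [cnt, h]
      · show (if c = z ∧ z = x ∧ x = d then (1:Int) else 0) + cnt d (x :: z :: r') = _
        have hcz : ¬(c = z ∧ z = x ∧ x = d) := by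
          rintro ⟨h1, h2, h3⟩; exact hx (h2.symm.trans h1.symm)
        by_cases h : d = c <;> simp [hcz, h] <;> intro h1 h2 <;> exact fun hxc => hx hxc
    | 2 =>
      show (if c = x ∧ x = c ∧ c = d then (1:Int) else 0) + cnt d (List.replicate 1 c ++ x :: r) = _
      rw [ih 1 (by omega)]
      have hcx : ¬(c = x ∧ x = c ∧ c = d) := by rintro ⟨h1, _, _⟩; exact hx h1.symm
      by_cases h : d = c <;> simp [hcx, h] <;> intro h1 <;> exact fun hxc => hx hxc
    | (m + 3) =>
      show (if c = c ∧ c = c ∧ c = d then (1:Int) else 0) + cnt d (List.replicate (m + 2) c ++ x :: r) = _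
      rw [ih (m + 2) (by omega)]
      by_cases h : d = c <;> simp [h, eq_comm] <;> omega

lemma bfold (rest : List Char) (c : Char) (k : Nat) (a b : Int) :
    flushB (rest.foldl stepB (a, b, some c, (k : Int) + 1)).1
        (rest.foldl stepB (a, b, some c, (k : Int) + 1)).2.1
        (rest.foldl stepB (a, b, some c, (k : Int) + 1)).2.2.1
        (rest.foldl stepB (a, b, some c, (k : Int) + 1)).2.2.2
      = (a + cnt 'A' (List.replicate (k + 1) c ++ rest),
         b + cnt 'B' (List.replicate (k + 1) c ++ rest)) := by
  induction rest generalizing c k a b with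
  | nil =>
    simp only [List.foldl_nil, List.append_nil]
    rw [cnt_replicate, cnt_replicate]
    unfold flushB
    by_cases hA : c = 'A' <;> by_cases hB : c = 'B' <;>
      simp [hA, hB, eq_comm]
  | cons ch r ihr =>
    simp only [List.foldl_cons]
    by_cases hc : ch = c
    · subst hc
      have hstep : stepB (a, b, some ch, (k : Int) + 1) ch
          = (a, b, some ch, ((k + 1 : Nat) : Int) + 1) := by
        unfold stepB; simp
      rw [hstep, ihr ch (k + 1) a b]
      have hrep : List.replicate (k + 1 + 1) ch ++ r = List.replicate (k + 1) ch ++ ch :: r := by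
        rw [List.replicate_succ']; simp
      rw [hrep]
    · have hstep : stepB (a, b, some c, (k : Int) + 1) ch
          = ((flushB a b (some c) ((k : Int) + 1)).1,
             (flushB a b (some c) ((k : Int) + 1)).2, some ch, ((0 : Nat) : Int) + 1) := by
        unfold stepB; simp [hc]
      rw [hstep, ihr ch 0 _ _]
      rw [cnt_run_boundary 'A' c ch r (k + 1) hc, cnt_run_boundary 'B' c ch r (k + 1) hc]
      have h1 : List.replicate (0 + 1) ch ++ r = ch :: r := by simp
      rw [h1]
      unfold flushB
      by_cases hA : c = 'A' <;> by_cases hB : c = 'B' <;>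
        simp [hA, hB, eq_comm] <;> omega

lemma winnerOfGame_eq_cnt (colors : String) :
    winnerOfGame colors = decide (cnt 'A' colors.toList > cnt 'B' colors.toList) := by
  unfold winnerOfGame
  simp only [PySem.Str.len_eq]
  rw [decide_eq_decide]
  rw [foldA_eq, sumA_eq, sumA_eq]
  simp

lemma winnerOfGame_alt_eq_cnt (colors : String) :
    winnerOfGame_alt colors = decide (cnt 'A' colors.toList > cnt 'B' colors.toList) := by
  unfold winnerOfGame_alt
  rw [decide_eq_decide]
  rcases hl : colors.toList with _ | ⟨ch, r⟩
  · simp [flushB, cnt]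
  · simp only [List.foldl_cons]
    have hstep : stepB (0, 0, none, 0) ch = (0, 0, some ch, ((0 : Nat) : Int) + 1) := by
      unfold stepB flushB; simp
    rw [hstep, bfold r ch 0 0 0]
    simp

-- ===== VERDICT (by name: the statement is the Claim_ definition above) =====
theorem winnerOfGame_spec : Claim_equal_winnerOfGame := by
  intro colors _
  unfold Spec_winnerOfGame
  rw [winnerOfGame_eq_cnt, winnerOfGame_alt_eq_cnt]
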